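-- pv_equiv track=rewrite | github.com/N-Hulley/2021-adventofcode | Day 1 Sonar Sweep/Part Two/challenge.py | get_line_sums
-- ===== SOURCE A (Python) =====
-- def parse_lines(lines):
--   parsed_lines = []
--   for line in lines:
--     if line.isdigit():
--       parsed_lines.append(int(line))
--   return parsed_lines
--
-- def get_line_sums(lines, increment_amount:int = 3):
--   parsed_lines = parse_lines(lines)
--   line_sums = []
--   for i in range(len(lines)):
--     line_sum = 0
--     for j in range(increment_amount):
--       try:
--         line_sum += parsed_lines[i + j]
--       except:
--         next
--     line_sums.append(line_sum)
--   return line_sums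
-- ===== SOURCE B (Python) =====
-- def get_line_sums(lines, increment_amount: int = 3):
--     parsed = [int(line) for line in lines if line.isdigit()]
--     m = len(parsed)
--     if increment_amount <= 0:
--         return [0] * len(lines)
--     pref = [0]
--     for v in parsed:
--         pref.append(pref[-1] + v)
--     return [pref[min(i + increment_amount, m)] - pref[min(i, m)]
--             for i in range(len(lines))]
-- ===== Notes on version B (the rewrite author's own statement) =====
-- stated objective: faster
-- what changed: replaces the per-index inner loop over increment_amount try/except lookups by a prefix-sum array, so each window sum becomes one subtraction
import Mathlib
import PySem

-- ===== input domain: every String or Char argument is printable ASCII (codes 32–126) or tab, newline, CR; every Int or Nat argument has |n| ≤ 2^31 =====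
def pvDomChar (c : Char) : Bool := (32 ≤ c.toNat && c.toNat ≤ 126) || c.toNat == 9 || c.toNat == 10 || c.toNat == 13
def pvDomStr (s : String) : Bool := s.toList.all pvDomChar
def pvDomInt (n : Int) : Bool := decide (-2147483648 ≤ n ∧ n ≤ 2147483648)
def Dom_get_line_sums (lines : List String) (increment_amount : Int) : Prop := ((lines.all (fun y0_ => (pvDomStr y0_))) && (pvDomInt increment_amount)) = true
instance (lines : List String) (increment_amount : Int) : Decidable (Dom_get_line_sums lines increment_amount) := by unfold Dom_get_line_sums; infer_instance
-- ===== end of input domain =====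

-- B replaces A's per-index inner loop (increment_amount try/except lookups per line) by a
-- prefix-sum array, so each window sum is one subtraction.

-- ===== PORT A =====
-- int(line) is ported as (ofStr? line).getD 0: it is only reached when line.isdigit(),
-- where Python's int cannot raise.
def parse_lines (lines : List String) : List Int :=
  lines.foldl
    (fun acc line =>
      if PySem.Str.strIsdigit line then acc ++ [(PySem.Int.ofStr? line).getD 0] else acc) []

def get_line_sums (lines : List String) (increment_amount : Int) : List Int :=
  let parsed := parse_lines lines
  (PySem.List.pyRange 0 lines.length 1).foldl
    (fun sums i =>
      -- try: line_sum += parsed[i+j]  except: skip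
      sums ++ [(PySem.List.pyRange 0 increment_amount 1).foldl
        (fun acc j =>
          match PySem.List.pyGet? parsed (i + j) with
          | some v => acc + v
          | none => acc) 0]) []

-- ===== PORT B =====
-- pref = [0]; for v in parsed: pref.append(pref[-1] + v)
def prefList (parsed : List Int) : List Int :=
  parsed.foldl (fun pref v => pref ++ [pref.getLast! + v]) [0]

def get_line_sums_alt (lines : List String) (increment_amount : Int) : List Int :=
  let parsed := lines.filterMap
    (fun line => if PySem.Str.strIsdigit line then some ((PySem.Int.ofStr? line).getD 0) else none)
  let m : Int := parsed.length
  if increment_amount ≤ 0 then List.replicate lines.length 0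
  else
    let pref := prefList parsed
    (List.range lines.length).map (fun (i : Nat) =>
      pref.getD (min ((i : Int) + increment_amount) m).toNat 0
        - pref.getD (min (i : Int) m).toNat 0)

-- ===== PRECONDITION & SPEC =====
def Spec_get_line_sums (lines : List String) (increment_amount : Int) (out : List Int) : Prop := out = get_line_sums_alt lines increment_amount
instance (lines : List String) (increment_amount : Int) (out : List Int) : Decidable (Spec_get_line_sums lines increment_amount out) := by unfold Spec_get_line_sums; infer_instance

-- ===== CLAIM (what is proved, stated in full; the proofs are below) =====
def Claim_equal_get_line_sums : Prop := ∀ (lines : List String) (increment_amount : Int), Dom_get_line_sums lines increment_amount → Spec_get_line_sums lines increment_amount (get_line_sums lines increment_amount)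

-- ===== LEMMAS AND PROOFS =====

-- filter-then-map = filterMap with an if-body
theorem filter_map_eq_filterMap {α β : Type} (p : α → Bool) (f : α → β) (l : List α) :
    (l.filter p).map f = l.filterMap (fun x => if p x then some (f x) else none) := by
  induction l with
  | nil => rfl
  | cons x xs ih =>
    by_cases h : p x <;> simp [h, ih]

-- A's parse_lines equals B's filterMap
theorem parse_lines_eq (lines : List String) :
    parse_lines lines = lines.filterMap
      (fun line => if PySem.Str.strIsdigit line then some ((PySem.Int.ofStr? line).getD 0) else none) := by
  unfold parse_lines
  rw [PySem.List.foldl_append_if, List.nil_append, filter_map_eq_filterMap]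

-- sum of take (n+1) in terms of take n
theorem sum_take_succ (xs : List Int) (n : Nat) :
    (xs.take (n + 1)).sum = (xs.take n).sum + xs.getD n 0 := by
  rw [List.take_add_one]
  cases h : xs[n]? <;> simp [List.getD, h]

-- A's inner loop over List.range computes a slice sum
theorem inner_range_sum (parsed : List Int) :
    ∀ (n i : Nat) (s : Int),
    (List.range n).foldl (fun acc j => acc + parsed.getD (i + j) 0) s
      = s + ((parsed.drop i).take n).sum := by
  intro n
  induction n with
  | zero => intro i s; simp
  | succ n ih =>
    intro i s
    rw [List.range_succ, List.foldl_append]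
    simp only [List.foldl_cons, List.foldl_nil, ih]
    rw [sum_take_succ]
    have hd : (parsed.drop i).getD n 0 = parsed.getD (i + n) 0 := by
      simp [List.getD, List.getElem?_drop]
    rw [hd]; ring

-- A's inner try/except loop = slice sum (positive window)
theorem innerA_eq (parsed : List Int) (i : Nat) (inc : Int) :
    (PySem.List.pyRange 0 inc 1).foldl
      (fun acc j => match PySem.List.pyGet? parsed ((i : Int) + j) with
        | some v => acc + v
        | none => acc) 0
      = ((parsed.drop i).take inc.toNat).sum := by
  have hf : (fun (acc : Int) (j : Int) =>
      match PySem.List.pyGet? parsed ((i : Int) + j) with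
      | some v => acc + v
      | none => acc)
      = fun acc j => acc + PySem.List.pyGetD parsed ((i : Int) + j) 0 := by
    funext acc j
    cases hg : PySem.List.pyGet? parsed ((i : Int) + j) <;>
      simp [PySem.List.pyGetD, hg]
  rw [hf, PySem.List.pyRange_one 0 inc, List.foldl_map]
  rw [PySem.List.foldl_congr_mem _ _ (fun acc (k : Nat) => acc + parsed.getD (i + k) 0) 0
    (by
      intro acc k _
      have hcast : (i : Int) + ((0 : Int) + (k : Int)) = ((i + k : Nat) : Int) := by
        push_cast; ring
      rw [hcast, PySem.List.pyGetD_natCast])]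
  rw [inner_range_sum parsed _ i 0, zero_add]
  norm_num

-- last element of a one-element append
theorem getLast!_concat_int (acc : List Int) (x : Int) : (acc ++ [x]).getLast! = x := by
  induction acc with
  | nil => rfl
  | cons a as ih =>
    cases as with
    | nil => rfl
    | cons b bs => simpa [List.getLast!] using ih

-- invariant of B's prefix loop
theorem prefList_go (xs : List Int) :
    ∀ (acc : List Int) (s : Int), acc.getLast! = s →
    xs.foldl (fun pref v => pref ++ [pref.getLast! + v]) acc
      = acc ++ (List.range xs.length).map (fun k => s + (xs.take (k + 1)).sum) := by
  induction xs with
  | nil => intro acc s _; simp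
  | cons x xs ih =>
    intro acc s hlast
    simp only [List.foldl_cons]
    rw [ih (acc ++ [acc.getLast! + x]) (s + x)
      (by rw [getLast!_concat_int, hlast])]
    rw [hlast, List.length_cons, List.range_succ_eq_map, List.map_cons, List.map_map]
    rw [List.append_assoc, List.singleton_append]
    congr 1
    congr 1
    · simp
    · apply List.map_congr_left
      intro k _
      simp [Function.comp, List.take_succ_cons]
      ring

-- prefList characterized: entry k is the sum of the first k elements
theorem prefList_eq (xs : List Int) :
    prefList xs = (List.range (xs.length + 1)).map (fun k => (xs.take k).sum) := by
  unfold prefList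
  rw [prefList_go xs [0] 0 rfl]
  rw [List.range_succ_eq_map, List.map_cons, List.map_map]
  simp [Function.comp]

theorem prefList_getD (xs : List Int) (k : Nat) (hk : k ≤ xs.length) :
    (prefList xs).getD k 0 = (xs.take k).sum := by
  rw [prefList_eq]
  exact PySem.List.getD_map_range _ _ _ _ (by omega)

-- take past the length, via min
theorem take_min_length (xs : List Int) (a : Nat) :
    xs.take (min a xs.length) = xs.take a := by
  by_cases h : a ≤ xs.length
  · rw [Nat.min_eq_left h]
  · rw [Nat.min_eq_right (by omega), List.take_of_length_le (Nat.le_refl _),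
      List.take_of_length_le (by omega)]

-- ===== VERDICT (by name: the statement is the Claim_ definition above) =====
theorem get_line_sums_spec : Claim_equal_get_line_sums := by
  intro lines inc _
  unfold Spec_get_line_sums
  simp only [get_line_sums, get_line_sums_alt, parse_lines_eq]
  set parsed := lines.filterMap
    (fun line => if PySem.Str.strIsdigit line then some ((PySem.Int.ofStr? line).getD 0) else none)
    with hparsed
  rw [PySem.List.foldl_append_singleton_eq_map, List.nil_append,
    PySem.List.pyRange_zero_natCast, List.map_map]
  by_cases hpos : inc ≤ 0
  · -- empty window: both sides are all zeros
    rw [if_pos hpos]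
    simp only [PySem.List.pyRange_one_eq_nil hpos, List.foldl_nil]
    simp [List.eq_replicate_iff, Function.comp]
  · rw [if_neg hpos]
    have hpos' : (0 : Int) < inc := by omega
    apply List.map_congr_left
    intro i _
    simp only [Function.comp]
    rw [innerA_eq parsed i inc]
    have hm : (0 : Int) ≤ (parsed.length : Int) := by positivity
    have h1 : (min ((i : Int) + inc) ((parsed.length : Nat) : Int)).toNat
        = min (i + inc.toNat) parsed.length := by omega
    have h2 : (min ((i : Int)) ((parsed.length : Nat) : Int)).toNat
        = min i parsed.length := by omega
    rw [h1, h2]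
    rw [prefList_getD _ _ (by omega), prefList_getD _ _ (by omega)]
    rw [take_min_length, take_min_length]
    rw [List.take_add, List.sum_append]
    ring
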